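-- pv_equiv track=rewrite | github.com/sc-likes-to-code/ML---5th-SEM | Assignment 3/senti_anal1.py | analyze_review
-- ===== SOURCE A (Python) =====
-- positive_words = {"good", "great", "amazing", "enjoyable", "nice", "fantastic", "love", "excellent", "wonderful", "best"}
--
-- negative_words = {"bad", "worst", "boring", "terrible", "awful", "poor", "hate", "2nd grade", "waste", "disappointing"}
--
-- pronouns = {"i", "me", "my", "you", "your"}
--
-- def analyze_review(review):
--     review_lower = review.lower()
--     words = review_lower.split()
--
--     # Feature counts
--     pos_count = 0
--     neg_count = 0
--     pronoun_count = 0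
--     contains_no = 1 if "no" in words else 0
--     exclamation_count = review.count("!")
--     total_words = len(words)
--
--     for word in words:
--         word_clean = word.strip(".,!?")  # remove punctuation
--         if word_clean in positive_words:
--             pos_count += 1
--         elif word_clean in negative_words:
--             neg_count += 1
--         if word_clean in pronouns:
--             pronoun_count += 1
--
--     return pos_count, neg_count, contains_no, pronoun_count, exclamation_count, total_words
-- ===== SOURCE B (Python) =====
-- positive_words = {"good", "great", "amazing", "enjoyable", "nice", "fantastic", "love", "excellent", "wonderful", "best"}
--
-- negative_words = {"bad", "worst", "boring", "terrible", "awful", "poor", "hate", "2nd grade", "waste", "disappointing"}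
--
-- pronouns = {"i", "me", "my", "you", "your"}
--
-- def analyze_review(review):
--     words = review.lower().split()
--     # frequency table of cleaned tokens, built once
--     counts = {}
--     for w in words:
--         wc = w.strip(".,!?")
--         counts[wc] = counts.get(wc, 0) + 1
--     # scan the vocabularies instead of the word list
--     pos_count = sum(counts.get(w, 0) for w in positive_words)
--     neg_count = sum(counts.get(w, 0) for w in negative_words)
--     pronoun_count = sum(counts.get(w, 0) for w in pronouns)
--     contains_no = 1 if "no" in words else 0
--     return pos_count, neg_count, contains_no, pronoun_count, review.count("!"), len(words)
-- ===== Notes on version B (the rewrite author's own statement) =====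
-- stated objective: alternative
-- what changed: B builds a frequency table of cleaned tokens once and then sums lookups over each vocabulary set, instead of testing every word against each set inside the loop.
import Mathlib
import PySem

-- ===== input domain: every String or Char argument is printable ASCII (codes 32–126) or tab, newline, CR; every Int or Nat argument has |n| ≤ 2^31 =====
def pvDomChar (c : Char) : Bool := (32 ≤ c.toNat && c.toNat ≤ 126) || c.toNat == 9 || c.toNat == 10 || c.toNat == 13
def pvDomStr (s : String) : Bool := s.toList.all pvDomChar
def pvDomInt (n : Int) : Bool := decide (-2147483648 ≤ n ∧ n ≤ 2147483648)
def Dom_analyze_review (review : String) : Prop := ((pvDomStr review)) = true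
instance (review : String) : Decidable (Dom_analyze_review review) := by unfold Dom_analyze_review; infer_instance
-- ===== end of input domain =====

-- B builds a frequency table of the cleaned tokens once and then sums lookups over each
-- vocabulary set, instead of testing every word against each set inside the loop (objective: alternative).

-- module-level vocabularies (Python sets of distinct literals)
def posWords : List String :=
  ["good", "great", "amazing", "enjoyable", "nice", "fantastic", "love", "excellent", "wonderful", "best"]
def negWords : List String :=
  ["bad", "worst", "boring", "terrible", "awful", "poor", "hate", "2nd grade", "waste", "disappointing"]
def pronounWords : List String := ["i", "me", "my", "you", "your"]

-- ===== PORT A =====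
def analyze_review (review : String) : Int × Int × Int × Int × Int × Int :=
  let review_lower := PySem.Str.lower review
  let words := PySem.Str.split₀ review_lower
  let contains_no : Int := if words.contains "no" then 1 else 0
  let exclamation_count : Int := (PySem.Str.count review "!" : Int)
  let total_words : Int := (words.length : Int)
  let s :=
    words.foldl (fun (s : Int × Int × Int) word =>
      let word_clean := PySem.Str.stripChars word ".,!?"
      let s1 :=
        if posWords.contains word_clean then (s.1 + 1, s.2.1, s.2.2)
        else if negWords.contains word_clean then (s.1, s.2.1 + 1, s.2.2)
        else s
      if pronounWords.contains word_clean then (s1.1, s1.2.1, s1.2.2 + 1) else s1)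
      (0, 0, 0)
  (s.1, s.2.1, contains_no, s.2.2, exclamation_count, total_words)

-- ===== PORT B =====
def analyze_review_alt (review : String) : Int × Int × Int × Int × Int × Int :=
  let words := PySem.Str.split₀ (PySem.Str.lower review)
  let counts :=
    words.foldl (fun (d : PySem.Dict String Int) w =>
      let wc := PySem.Str.stripChars w ".,!?"
      d.insert wc (d.getD wc 0 + 1)) PySem.Dict.empty
  let pos_count := (posWords.map (fun w => counts.getD w 0)).sum
  let neg_count := (negWords.map (fun w => counts.getD w 0)).sum
  let pronoun_count := (pronounWords.map (fun w => counts.getD w 0)).sum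
  let contains_no : Int := if words.contains "no" then 1 else 0
  (pos_count, neg_count, contains_no, pronoun_count,
   (PySem.Str.count review "!" : Int), (words.length : Int))

-- ===== PRECONDITION & SPEC =====
def Spec_analyze_review (review : String) (out : Int × Int × Int × Int × Int × Int) : Prop := out = analyze_review_alt review
instance (review : String) (out : Int × Int × Int × Int × Int × Int) : Decidable (Spec_analyze_review review out) := by unfold Spec_analyze_review; infer_instance

-- ===== CLAIM (what is proved, stated in full; the proofs are below) =====
def Claim_equal_analyze_review : Prop := ∀ (review : String), Dom_analyze_review review → Spec_analyze_review review (analyze_review review)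

-- ===== LEMMAS AND PROOFS =====

-- countP splits over a disjunction of disjoint Boolean predicates
lemma countP_or_disjoint (p q : String → Bool) (l : List String)
    (h : ∀ x, p x = true → q x = false) :
    l.countP (fun x => p x || q x) = l.countP p + l.countP q := by
  induction l with
  | nil => simp
  | cons x l ih =>
    by_cases hp : p x = true
    · simp [hp, h x hp, ih]; omega
    · simp only [Bool.not_eq_true] at hp
      by_cases hq : q x = true <;> simp [hp, hq, ih] <;> omega

-- summing counts over a duplicate-free vocabulary = counting membership in it
lemma sum_count_eq_countP (V : List String) (hV : V.Nodup) (l : List String) :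
    (V.map (fun w => (l.count w : Int))).sum = (l.countP (fun x => V.contains x) : Int) := by
  induction V with
  | nil => simp [List.countP_false]
  | cons v V ih =>
    rcases List.nodup_cons.mp hV with ⟨hv, hV'⟩
    have hsplit : l.countP (fun x => (v :: V).contains x)
        = l.countP (fun x => x == v) + l.countP (fun x => V.contains x) := by
      have := countP_or_disjoint (fun x => x == v) (fun x => V.contains x) l
        (by intro x hx; simp at hx; subst hx; simpa using hv)
      simpa [List.contains_cons] using this
    have hcv : l.count v = l.countP (fun x => x == v) := rfl
    simp only [List.map_cons, List.sum_cons, hsplit, hcv]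
    push_cast
    rw [ih hV']

-- the three vocabularies are duplicate-free
lemma posWords_nodup : posWords.Nodup := by decide
lemma negWords_nodup : negWords.Nodup := by decide
lemma pronounWords_nodup : pronounWords.Nodup := by decide

-- positive and negative vocabularies are disjoint
lemma neg_not_pos (x : String) (h : x ∈ negWords) : ¬ x ∈ posWords := by
  fin_cases h <;> decide

-- characterisation of A's three-counter loop
lemma loopA (ws : List String) (a b c : Int) :
    ws.foldl (fun (s : Int × Int × Int) word =>
      let word_clean := PySem.Str.stripChars word ".,!?"
      let s1 :=
        if posWords.contains word_clean then (s.1 + 1, s.2.1, s.2.2)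
        else if negWords.contains word_clean then (s.1, s.2.1 + 1, s.2.2)
        else s
      if pronounWords.contains word_clean then (s1.1, s1.2.1, s1.2.2 + 1) else s1)
      (a, b, c)
    = (a + (ws.countP (fun w => posWords.contains (PySem.Str.stripChars w ".,!?")) : Int),
       b + (ws.countP (fun w => !(posWords.contains (PySem.Str.stripChars w ".,!?"))
              && negWords.contains (PySem.Str.stripChars w ".,!?")) : Int),
       c + (ws.countP (fun w => pronounWords.contains (PySem.Str.stripChars w ".,!?")) : Int)) := by
  induction ws generalizing a b c with
  | nil => simp
  | cons w ws ih =>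
    simp only [List.foldl_cons, List.countP_cons]
    by_cases hp : posWords.contains (PySem.Str.stripChars w ".,!?") = true <;>
      by_cases hn : negWords.contains (PySem.Str.stripChars w ".,!?") = true <;>
      by_cases hr : pronounWords.contains (PySem.Str.stripChars w ".,!?") = true
    all_goals
      simp only [Bool.not_eq_true] at hp hn hr
    all_goals
      simp only [hp, hn, hr, if_true, Bool.not_true, Bool.not_false,
        Bool.true_and, Bool.false_and, ih]
    all_goals
      refine Prod.ext ?_ (Prod.ext ?_ ?_) <;> simp <;> ring

-- B's frequency-table lookup sum, expressed as a countP over the raw words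
lemma alt_component (V : List String) (hV : V.Nodup) (ws : List String) :
    (V.map (fun w =>
      (ws.foldl (fun (d : PySem.Dict String Int) w =>
        let wc := PySem.Str.stripChars w ".,!?"
        d.insert wc (d.getD wc 0 + 1)) PySem.Dict.empty).getD w 0)).sum
    = (ws.countP (fun w => V.contains (PySem.Str.stripChars w ".,!?")) : Int) := by
  have hctr : (ws.foldl (fun (d : PySem.Dict String Int) w =>
        let wc := PySem.Str.stripChars w ".,!?"
        d.insert wc (d.getD wc 0 + 1)) PySem.Dict.empty)
      = PySem.Dict.counter (ws.map (fun w => PySem.Str.stripChars w ".,!?")) := by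
    rw [← PySem.Dict.foldl_insert_getD_add_one_eq_counter, List.foldl_map]
  rw [hctr]
  simp only [PySem.Dict.getD_counter]
  rw [sum_count_eq_countP V hV, List.countP_map]
  rfl

-- ===== VERDICT (by name: the statement is the Claim_ definition above) =====
theorem analyze_review_spec : Claim_equal_analyze_review := by
  intro review _
  unfold Spec_analyze_review analyze_review analyze_review_alt
  dsimp only
  rw [loopA, alt_component posWords posWords_nodup,
    alt_component negWords negWords_nodup, alt_component pronounWords pronounWords_nodup]
  have hcongr :
      (PySem.Str.split₀ (PySem.Str.lower review)).countP
        (fun w => !(posWords.contains (PySem.Str.stripChars w ".,!?"))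
            && negWords.contains (PySem.Str.stripChars w ".,!?"))
      = (PySem.Str.split₀ (PySem.Str.lower review)).countP
        (fun w => negWords.contains (PySem.Str.stripChars w ".,!?")) := by
    apply List.countP_congr
    intro w _
    by_cases hn : PySem.Str.stripChars w ".,!?" ∈ negWords
    · have hp := neg_not_pos _ hn
      simp [hn, hp]
    · simp [hn]
  rw [hcongr]
  simp
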